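-- pv_equiv track=rewrite | github.com/pc5401/my_BOJ | 백준/Gold/16400. 소수 화폐/소수 화폐.py | solve
-- ===== SOURCE A (Python) =====
-- MOD = 123456789
--
-- def solve(N: int) -> int:
--     # 에라토스테네스 체
--     sieve = [True] * (N+1)
--     sieve[0] = sieve[1] = False
--     for i in range(2, int(N**0.5)+1):
--         if sieve[i]:
--             step = i
--             for j in range(i*i, N+1, step):
--                 sieve[j] = False
--     primes = [i for i, is_p in enumerate(sieve) if is_p]
--
--     dp = [0] * (N+1)
--     dp[0] = 1
--     for p in primes:
--         for x in range(p, N+1):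
--             dp[x] = (dp[x] + dp[x - p]) % MOD
--     return dp[N]
-- ===== SOURCE B (Python) =====
-- MOD = 123456789
--
-- def solve(N: int) -> int:
--     # same sieve as the original (preserves N<1 behaviour)
--     sieve = [True] * (N+1)
--     sieve[0] = sieve[1] = False
--     for i in range(2, int(N**0.5)+1):
--         if sieve[i]:
--             for j in range(i*i, N+1, i):
--                 sieve[j] = False
--     primes = [i for i, is_p in enumerate(sieve) if is_p]
--
--     # suffix tabulation with an explicit multiplicity sum:
--     # ways[x] = number of prime partitions of x using only the primes
--     # not yet folded in (initially none), processed largest-first;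
--     # ways[x::-p] holds exactly ways[x - k*p] for k = 0 .. x//p.
--     ways = [1] + [0] * N
--     for p in reversed(primes):
--         ways = [sum(ways[x::-p]) % MOD for x in range(N + 1)]
--     return ways[N]
-- ===== Notes on version B (the rewrite author's own statement) =====
-- stated objective: alternative
-- what changed: The bottom-up in-place 1D knapsack DP over primes (smallest first, dp[x] += dp[x-p]) is replaced by a suffix tabulation that rebuilds a fresh ways-table per prime, largest prime first, computing each entry as an explicit multiplicity sum over a strided slice (ways[x] = sum(ways[x::-p]) mod M); the sieve is kept identical so the IndexError on non-positive N is preserved.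
-- outside the precondition, e.g. on solve(0): A raises IndexError, B raises IndexError; on solve(-3): A raises IndexError, B raises IndexError
import Mathlib
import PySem

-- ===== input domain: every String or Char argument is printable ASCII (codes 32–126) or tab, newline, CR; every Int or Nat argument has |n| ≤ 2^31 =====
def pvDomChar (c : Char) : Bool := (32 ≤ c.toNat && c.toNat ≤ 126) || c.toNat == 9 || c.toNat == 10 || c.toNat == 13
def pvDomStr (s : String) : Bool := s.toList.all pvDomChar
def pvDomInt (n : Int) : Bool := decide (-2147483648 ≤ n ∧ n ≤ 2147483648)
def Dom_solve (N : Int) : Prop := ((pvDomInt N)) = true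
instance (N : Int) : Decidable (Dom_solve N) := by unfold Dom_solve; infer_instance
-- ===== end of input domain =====

-- B replaces the bottom-up in-place 1D knapsack DP by a suffix tabulation that rebuilds the
-- ways-table per prime (largest prime first) from an explicit multiplicity sum; same sieve,
-- same return value (objective: alternative).

def pvMOD : Int := 123456789

-- port of int(N**0.5): exact on the stated input domain (0 ≤ N ≤ 2^31, where the float sqrt is exact)
def pvIsqrt (N : Int) : Int := (Nat.sqrt N.toNat : Int)

-- the Eratosthenes sieve + prime-list comprehension, identical lines in Source A and Source B.
-- Python lists are arrays, so they are held as Lean Arrays; every index in these loops is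
-- nonnegative and (under Pre_) in range, where .toNat / setIfInBounds / getD are exact.
def pvPrimes (N : Int) : List Int :=
  let sieve0 : Array Bool := Array.replicate (N + 1).toNat true
  let sieve1 := sieve0.setIfInBounds 0 false
  let sieve2 := sieve1.setIfInBounds 1 false
  let sieve3 := (PySem.List.pyRange 2 (pvIsqrt N + 1) 1).foldl (fun sv i =>
      if sv.getD i.toNat false = true then
        (PySem.List.pyRange (i * i) (N + 1) i).foldl
          (fun sv2 j => sv2.setIfInBounds j.toNat false) sv
      else sv) sieve2
  ((PySem.List.enumerate sieve3.toList 0).filter (fun q => q.2)).map (fun q => q.1)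

-- ===== PORT A =====
def solve (N : Int) : Int :=
  let primes := pvPrimes N
  let dp0 := (Array.replicate (N + 1).toNat (0 : Int)).setIfInBounds 0 1
  let dp := primes.foldl (fun dp p =>
      (PySem.List.pyRange p (N + 1) 1).foldl (fun d x =>
        d.setIfInBounds x.toNat
          (PySem.Int.mod (d.getD x.toNat 0 + d.getD (x - p).toNat 0) pvMOD)) dp)
    dp0
  dp.getD N.toNat 0

-- ===== PORT B =====
def solve_alt (N : Int) : Int :=
  let primes := pvPrimes N
  let ways0 : Array Int := ((1 : Int) :: List.replicate N.toNat 0).toArray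
  -- the slice w[x::-p] reads exactly the indices range(x, -1, -p); with 0 ≤ x < len and
  -- 0 < p (true in these loops) this hand port of the slice-and-sum is exact
  let ways := primes.reverse.foldl (fun w p =>
      ((PySem.List.pyRange 0 (N + 1) 1).map (fun x =>
        PySem.Int.mod
          (((PySem.List.pyRange x (-1) (-p)).map (fun i => w.getD i.toNat 0)).sum)
          pvMOD)).toArray) ways0
  ways.getD N.toNat 0

-- ===== PRECONDITION & SPEC =====
-- Pre_ excludes exactly the non-positive inputs, on which the Python A raises IndexError
-- (the initial sieve assignments index past the end of the freshly built list there).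
def Pre_solve (N : Int) : Prop := 1 ≤ N
instance (N : Int) : Decidable (Pre_solve N) := by unfold Pre_solve; infer_instance
def pvWitness_solve : Int := 7

def Spec_solve (N : Int) (out : Int) : Prop := out = solve_alt N
instance (N : Int) (out : Int) : Decidable (Spec_solve N out) := by unfold Spec_solve; infer_instance

-- ===== CLAIM (what is proved, stated in full; the proofs are below) =====
def Claim_equal_solve : Prop := ∀ (N : Int), Dom_solve N → Pre_solve N → Spec_solve N (solve N)

-- ===== LEMMAS AND PROOFS =====

def cA : List Int → Nat → Nat
  | [], x => if x = 0 then 1 else 0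
  | p :: ps, x =>
    cA ps x + (if _h : 0 < p ∧ p ≤ (x : Int) then cA (p :: ps) (x - p.toNat) else 0)
termination_by ps x => ps.length + x
decreasing_by
  all_goals (simp only [List.length_cons]; omega)

theorem cA_cons (p : Int) (ps : List Int) (x : Nat) :
    cA (p :: ps) x = cA ps x + (if 0 < p ∧ p ≤ (x : Int) then cA (p :: ps) (x - p.toNat) else 0) := by
  rw [cA]; split_ifs <;> rfl

theorem cA_swap (a b : Int) (L : List Int) : ∀ x, cA (a :: b :: L) x = cA (b :: a :: L) x := by
  intro x
  induction x using Nat.strong_induction_on with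
  | _ x ih =>
    by_cases ha : 0 < a ∧ a ≤ (x : Int)
    · by_cases hb : 0 < b ∧ b ≤ (x : Int)
      · have hxa : x - a.toNat < x := by omega
        have hxb : x - b.toNat < x := by omega
        rw [cA_cons a, cA_cons b (a :: L), if_pos ha, if_pos hb,
            cA_cons b L, cA_cons a L, if_pos ha, if_pos hb,
            ih _ hxa, cA_cons b (a :: L), ← ih _ hxb, cA_cons a (b :: L)]
        by_cases hab : a.toNat + b.toNat ≤ x
        · have h1 : (0 < b ∧ b ≤ ((x - a.toNat : Nat) : Int)) := by
            refine ⟨hb.1, ?_⟩; omega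
          have h2 : (0 < a ∧ a ≤ ((x - b.toNat : Nat) : Int)) := by
            refine ⟨ha.1, ?_⟩; omega
          have he : x - b.toNat - a.toNat = x - a.toNat - b.toNat := by omega
          rw [if_pos h1, if_pos h2, ih (x - b.toNat - a.toNat) (by omega), he]
          omega
        · have h1 : ¬ (0 < b ∧ b ≤ ((x - a.toNat : Nat) : Int)) := by
            omega
          have h2 : ¬ (0 < a ∧ a ≤ ((x - b.toNat : Nat) : Int)) := by
            omega
          rw [if_neg h1, if_neg h2]
          omega
      · have hb' : ¬ (0 < b ∧ b ≤ ((x - a.toNat : Nat) : Int)) := by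
          omega
        rw [cA_cons a, cA_cons b (a :: L), if_pos ha, if_neg hb,
            cA_cons b L, cA_cons a L, if_pos ha, if_neg hb,
            ih _ (by omega : x - a.toNat < x), cA_cons b (a :: L), if_neg hb']
        omega
    · by_cases hb : 0 < b ∧ b ≤ (x : Int)
      · have ha' : ¬ (0 < a ∧ a ≤ ((x - b.toNat : Nat) : Int)) := by
          omega
        rw [cA_cons a, cA_cons b (a :: L), if_neg ha, if_pos hb,
            cA_cons b L, cA_cons a L, if_neg ha, if_pos hb,
            ← ih _ (by omega : x - b.toNat < x), cA_cons a (b :: L), if_neg ha']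
        omega
      · rw [cA_cons a, cA_cons b (a :: L), if_neg ha, if_neg hb,
            cA_cons b L, cA_cons a L, if_neg ha, if_neg hb]

theorem cA_cons_congr (p : Int) (L L' : List Int) (h : ∀ y, cA L y = cA L' y) :
    ∀ x, cA (p :: L) x = cA (p :: L') x := by
  intro x
  induction x using Nat.strong_induction_on with
  | _ x ih =>
    rw [cA_cons, cA_cons p L', h x]
    by_cases hp : 0 < p ∧ p ≤ (x : Int)
    · rw [if_pos hp, if_pos hp, ih _ (by omega)]
    · rw [if_neg hp, if_neg hp]

theorem cA_perm (L L' : List Int) (h : L.Perm L') : ∀ x, cA L x = cA L' x := by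
  induction h with
  | nil => intro x; rfl
  | cons p _ ih => exact cA_cons_congr p _ _ ih
  | swap a b l => exact cA_swap b a l
  | trans _ _ ih1 ih2 => intro x; rw [ih1 x, ih2 x]

theorem cA_mult (p : Int) (hp : 0 < p) (R : List Int) :
    ∀ x : Nat, ((List.range (x / p.toNat + 1)).map (fun k => cA R (x - k * p.toNat))).sum
      = cA (p :: R) x := by
  intro x
  induction x using Nat.strong_induction_on with
  | _ x ih =>
    by_cases hle : p ≤ (x : Int)
    · have hppx : p.toNat ≤ x := by omega
      rw [Nat.div_eq_sub_div (by omega) hppx]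
      rw [List.range_succ_eq_map, List.map_cons, List.sum_cons, List.map_map]
      have hmc : ((List.range ((x - p.toNat) / p.toNat + 1)).map
            ((fun k => cA R (x - k * p.toNat)) ∘ Nat.succ)).sum
          = ((List.range ((x - p.toNat) / p.toNat + 1)).map
            (fun k => cA R ((x - p.toNat) - k * p.toNat))).sum := by
        apply congrArg
        apply List.map_congr_left
        intro k _
        simp only [Function.comp_apply]
        congr 1
        have hs : Nat.succ k * p.toNat = p.toNat + k * p.toNat := by simp [Nat.succ_eq_add_one]; ring
        omega
      rw [hmc, ih (x - p.toNat) (by omega), cA_cons p R x, if_pos ⟨hp, hle⟩]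
      simp
    · have h0 : x / p.toNat = 0 := Nat.div_eq_of_lt (by omega)
      rw [h0]
      simp [cA_cons, hle]

theorem getD_set {α : Type} (l : List α) (i j : Nat) (a d : α) (h : i < l.length) :
    (l.set i a).getD j d = if i = j then a else l.getD j d := by
  rw [List.getD_eq_getElem?_getD, List.getElem?_set, List.getD_eq_getElem?_getD]
  split_ifs with h1
  · simp
  · rfl

theorem agetD {α : Type} (a : Array α) (i : Nat) (d : α) : a.getD i d = a.toList.getD i d := by
  unfold Array.getD
  split_ifs with h
  · rw [List.getD_eq_getElem _ _ (by simpa using h)]; simp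
  · rw [List.getD_eq_default]; simp; omega

theorem agetD_set {α : Type} (a : Array α) (i j : Nat) (v d : α) (h : i < a.size) :
    (a.setIfInBounds i v).getD j d = if i = j then v else a.getD j d := by
  rw [agetD, Array.toList_setIfInBounds, getD_set _ _ _ _ _ (by simpa using h), agetD]

theorem pyRangeDown (x p : Nat) (hp : 0 < p) :
    PySem.List.pyRange (x : Int) (-1) (-(p : Int)) =
      (List.range (x / p + 1)).map (fun k : Nat => (x : Int) - (p : Int) * (k : Int)) := by
  unfold PySem.List.pyRange
  rw [if_neg (by omega : ¬ -(p : Int) = 0), if_neg (by omega : ¬ (0:Int) < -(p : Int)),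
      if_pos (by omega : (-1 : Int) < (x : Int))]
  have hcnt : (((x : Int) - (-1) + -(-(p : Int)) - 1) / -(-(p : Int))).toNat = x / p + 1 := by
    rw [show ((x : Int) - (-1) + -(-(p : Int)) - 1) = (((x + p : Nat)) : Int) from by push_cast; ring,
        show -(-(p : Int)) = ((p : Nat) : Int) from by ring,
        ← Int.natCast_ediv, Int.toNat_natCast, Nat.add_div_right _ hp]
  rw [hcnt]
  apply List.map_congr_left
  intro k _
  ring

theorem B_row (n : Nat) (R : List Int) (pp : Nat) (hp : 2 ≤ pp)
    (w : Array Int) (hw : ∀ x : Nat, x ≤ n → w.getD x 0 = ((cA R x : Int)) % pvMOD) :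
    ∀ x : Nat, x ≤ n →
      (((PySem.List.pyRange 0 ((n : Int) + 1) 1).map (fun x =>
        PySem.Int.mod
          (((PySem.List.pyRange x (-1) (-(pp : Int))).map (fun i => w.getD i.toNat 0)).sum)
          pvMOD)).toArray).getD x 0
      = ((cA ((pp : Int) :: R) x : Int)) % pvMOD := by
  intro x hx
  rw [agetD, List.toList_toArray]
  have hcast : ((n : Int) + 1) = ((n + 1 : Nat) : Int) := by push_cast; ring
  rw [List.getD_eq_getElem?_getD, hcast,
      PySem.List.getElem?_map_pyRange_zero _ (n+1) x (by omega), Option.getD_some]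
  rw [pyRangeDown x pp (by omega), List.map_map]
  have hmap : (List.range (x / pp + 1)).map
        ((fun i => w.getD i.toNat 0) ∘ (fun k : Nat => (x : Int) - (pp : Int) * (k : Int)))
      = (List.range (x / pp + 1)).map (fun k : Nat => ((cA R (x - k * pp) : Int)) % pvMOD) := by
    apply List.map_congr_left
    intro k hk
    simp only [Function.comp_apply]
    have hkx : k * pp ≤ x := by
      have hk' : k ≤ x / pp := by
        have := List.mem_range.mp hk; omega
      calc k * pp ≤ (x / pp) * pp := Nat.mul_le_mul_right _ hk'
      _ ≤ x := Nat.div_mul_le_self x pp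
    have hidx : (x : Int) - (pp : Int) * (k : Int) = ((x - k * pp : Nat) : Int) := by
      push_cast [hkx]; ring
    rw [hidx, Int.toNat_natCast, hw _ (by omega)]
  rw [hmap]
  have hM : (0 : Int) < pvMOD := by norm_num [pvMOD]
  rw [PySem.Int.mod_eq_emod_of_pos hM]
  have : (List.range (x / pp + 1)).map (fun k : Nat => ((cA R (x - k * pp) : Int)) % pvMOD)
      = ((List.range (x / pp + 1)).map (fun k : Nat => ((cA R (x - k * pp) : Int)))).map (· % pvMOD) := by
    rw [List.map_map]; rfl
  rw [this, ← List.sum_int_mod]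
  have hc : ((List.range (x / pp + 1)).map (fun k : Nat => ((cA R (x - k * pp) : Int)))).sum
      = ((cA ((pp : Int) :: R) x : Int)) := by
    rw [show (fun k : Nat => ((cA R (x - k * pp) : Int)))
          = (Nat.cast ∘ (fun k => cA R (x - k * pp))) from rfl,
        ← List.map_map, ← Nat.cast_list_sum]
    have := cA_mult (pp : Int) (by omega) R x
    simp only [Int.toNat_natCast] at this
    exact congrArg _ this
  rw [hc]

theorem A_inner (n : Nat) (R : List Int) (pp : Nat) (hp : 2 ≤ pp)
    (dp : Array Int) (hlen : dp.size = n + 1)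
    (hdp : ∀ x : Nat, x ≤ n → dp.getD x 0 = ((cA R x : Int)) % pvMOD) :
    ∀ t : Nat, pp + t ≤ n + 1 →
      ((PySem.List.pyRange (pp : Int) ((pp : Int) + (t : Int)) 1).foldl
        (fun d x => d.setIfInBounds x.toNat
          (PySem.Int.mod (d.getD x.toNat 0 + d.getD (x - (pp : Int)).toNat 0) pvMOD)) dp).size = n + 1
      ∧ ∀ x : Nat, x ≤ n →
        (x < pp + t →
          ((PySem.List.pyRange (pp : Int) ((pp : Int) + (t : Int)) 1).foldl
            (fun d x => d.setIfInBounds x.toNat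
              (PySem.Int.mod (d.getD x.toNat 0 + d.getD (x - (pp : Int)).toNat 0) pvMOD)) dp).getD x 0
            = ((cA ((pp : Int) :: R) x : Int)) % pvMOD)
        ∧ (pp + t ≤ x →
          ((PySem.List.pyRange (pp : Int) ((pp : Int) + (t : Int)) 1).foldl
            (fun d x => d.setIfInBounds x.toNat
              (PySem.Int.mod (d.getD x.toNat 0 + d.getD (x - (pp : Int)).toNat 0) pvMOD)) dp).getD x 0
            = dp.getD x 0) := by
  intro t
  induction t with
  | zero =>
    intro _
    rw [show ((pp : Int) + (0 : Nat)) = (pp : Int) from by push_cast; ring,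
        PySem.List.pyRange_one_eq_nil le_rfl]
    simp only [List.foldl_nil]
    refine ⟨hlen, fun x hx => ⟨fun hxp => ?_, fun _ => trivial⟩⟩
    rw [hdp x hx, cA_cons, if_neg (by omega : ¬ (0 < (pp:Int) ∧ (pp:Int) ≤ (x:Int)))]
    norm_num
  | succ t ih =>
    intro ht
    have ht' : pp + t ≤ n + 1 := by omega
    obtain ⟨ihlen, ihval⟩ := ih ht'
    have hxm : pp + t ≤ n := by omega
    have hsplit : ((pp : Int) + ((t + 1 : Nat) : Int)) = ((pp : Int) + (t : Int)) + 1 := by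
      push_cast; ring
    rw [hsplit, PySem.List.pyRange_one_succ_right (by omega), List.foldl_append,
        List.foldl_cons, List.foldl_nil]
    set r0 := (PySem.List.pyRange (pp : Int) ((pp : Int) + (t : Int)) 1).foldl
        (fun d x => d.setIfInBounds x.toNat
          (PySem.Int.mod (d.getD x.toNat 0 + d.getD (x - (pp : Int)).toNat 0) pvMOD)) dp
      with hr0
    -- the single update at index xm = pp + t
    have hxmc : ((pp : Int) + (t : Int)) = ((pp + t : Nat) : Int) := by push_cast; ring
    have hg1 : r0.getD ((pp : Int) + (t : Int)).toNat 0 = r0.getD (pp + t) 0 := by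
      rw [hxmc, Int.toNat_natCast]
    have hg2 : r0.getD (((pp : Int) + (t : Int)) - (pp : Int)).toNat 0 = r0.getD t 0 := by
      rw [show ((pp : Int) + (t : Int)) - (pp : Int) = ((t : Nat) : Int) from by ring,
          Int.toNat_natCast]
    have hv1 : r0.getD (pp + t) 0 = ((cA R (pp + t) : Int)) % pvMOD := by
      rw [(ihval (pp + t) hxm).2 le_rfl, hdp _ hxm]
    have hv2 : r0.getD t 0 = ((cA ((pp : Int) :: R) t : Int)) % pvMOD := by
      exact (ihval t (by omega)).1 (by omega)
    have hM : (0 : Int) < pvMOD := by norm_num [pvMOD]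
    have hval : PySem.Int.mod (r0.getD ((pp : Int) + (t : Int)).toNat 0
          + r0.getD (((pp : Int) + (t : Int)) - (pp : Int)).toNat 0) pvMOD
        = ((cA ((pp : Int) :: R) (pp + t) : Int)) % pvMOD := by
      rw [PySem.Int.mod_eq_emod_of_pos hM, hg1, hg2, hv1, hv2, ← Int.add_emod]
      rw [cA_cons (pp : Int) R (pp + t), if_pos (by constructor <;> omega), Int.toNat_natCast,
          show pp + t - pp = t from by omega]
      push_cast
      ring
    rw [hval, hxmc, Int.toNat_natCast]
    have hlen0 : r0.size = n + 1 := ihlen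
    have hlt : pp + t < r0.size := by omega
    constructor
    · rw [Array.size_setIfInBounds]; exact ihlen
    · intro x hx
      constructor
      · intro hxlt
        rw [agetD_set _ _ _ _ _ hlt]
        by_cases hxe : pp + t = x
        · rw [if_pos hxe, ← hxe]
        · rw [if_neg hxe]
          exact (ihval x hx).1 (by omega)
      · intro hxge
        rw [agetD_set _ _ _ _ _ hlt, if_neg (by omega)]
        exact (ihval x hx).2 (by omega)

theorem A_outer (n : Nat) (L : List Int) (R : List Int)
    (hL : ∀ p ∈ L, ∃ pp : Nat, p = (pp : Int) ∧ 2 ≤ pp ∧ pp ≤ n) :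
    ∀ (dp : Array Int), dp.size = n + 1 →
    (∀ x : Nat, x ≤ n → dp.getD x 0 = ((cA R x : Int)) % pvMOD) →
      (L.foldl (fun d p =>
        (PySem.List.pyRange p ((n : Int) + 1) 1).foldl
          (fun d x => d.setIfInBounds x.toNat
            (PySem.Int.mod (d.getD x.toNat 0 + d.getD (x - p).toNat 0) pvMOD)) d) dp).size = n + 1
      ∧ ∀ x : Nat, x ≤ n →
        (L.foldl (fun d p =>
          (PySem.List.pyRange p ((n : Int) + 1) 1).foldl
            (fun d x => d.setIfInBounds x.toNat
              (PySem.Int.mod (d.getD x.toNat 0 + d.getD (x - p).toNat 0) pvMOD)) d) dp).getD x 0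
          = ((cA (L.reverse ++ R) x : Int)) % pvMOD := by
  induction L generalizing R with
  | nil => intro dp hlen hdp; exact ⟨hlen, fun x hx => by simpa using hdp x hx⟩
  | cons p L ih =>
    intro dp hlen hdp
    obtain ⟨pp, rfl, hp2, hpn⟩ := hL p (List.mem_cons_self)
    rw [List.foldl_cons]
    have hbound : ((n : Int) + 1) = ((pp : Int) + ((n + 1 - pp : Nat) : Int)) := by omega
    have hin := A_inner n R pp hp2 dp hlen hdp (n + 1 - pp) (by omega)
    rw [← hbound] at hin
    obtain ⟨hlen1, hval1⟩ := hin
    have hdp1 : ∀ x : Nat, x ≤ n →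
        ((PySem.List.pyRange (pp : Int) ((n : Int) + 1) 1).foldl
          (fun d x => d.setIfInBounds x.toNat
            (PySem.Int.mod (d.getD x.toNat 0 + d.getD (x - (pp : Int)).toNat 0) pvMOD)) dp).getD x 0
        = ((cA ((pp : Int) :: R) x : Int)) % pvMOD := by
      intro x hx
      exact (hval1 x hx).1 (by omega)
    have := ih ((pp : Int) :: R) (fun q hq => hL q (List.mem_cons_of_mem _ hq)) _ hlen1 hdp1
    refine ⟨this.1, fun x hx => ?_⟩
    rw [this.2 x hx]
    congr 2
    simp

theorem B_outer (n : Nat) (L : List Int) (R : List Int)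
    (hL : ∀ p ∈ L, ∃ pp : Nat, p = (pp : Int) ∧ 2 ≤ pp) :
    ∀ (w : Array Int),
    (∀ x : Nat, x ≤ n → w.getD x 0 = ((cA R x : Int)) % pvMOD) →
      ∀ x : Nat, x ≤ n →
        (L.foldl (fun w p =>
          ((PySem.List.pyRange 0 ((n : Int) + 1) 1).map (fun x =>
            PySem.Int.mod
              (((PySem.List.pyRange x (-1) (-p)).map (fun i => w.getD i.toNat 0)).sum)
              pvMOD)).toArray) w).getD x 0
          = ((cA (L.reverse ++ R) x : Int)) % pvMOD := by
  induction L generalizing R with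
  | nil => intro w hw x hx; simpa using hw x hx
  | cons p L ih =>
    intro w hw x hx
    obtain ⟨pp, rfl, hp2⟩ := hL p (List.mem_cons_self)
    rw [List.foldl_cons]
    have hrow := B_row n R pp hp2 w hw
    have := ih ((pp : Int) :: R) (fun q hq => hL q (List.mem_cons_of_mem _ hq)) _ hrow x hx
    rw [this]
    congr 2
    simp

theorem step_mono (s : Array Bool) (j : Nat) (k : Nat)
    (h : (s.setIfInBounds j false).getD k false = true) : s.getD k false = true := by
  by_cases hk : j < s.size
  · rw [agetD_set _ _ _ _ _ hk] at h
    by_cases he : j = k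
    · simp [he] at h
    · rwa [if_neg he] at h
  · rw [agetD, Array.toList_setIfInBounds,
        List.set_eq_of_length_le (by simp; omega), ← agetD] at h
    exact h

theorem inner_mono (js : List Int) :
    ∀ (sv : Array Bool) (k : Nat),
      ((js.foldl (fun s j => s.setIfInBounds j.toNat false) sv).getD k false = true) →
      sv.getD k false = true := by
  induction js with
  | nil => intro sv k h; exact h
  | cons j js ih =>
    intro sv k h
    rw [List.foldl_cons] at h
    exact step_mono sv j.toNat k (ih _ k h)

theorem inner_len (js : List Int) :
    ∀ (sv : Array Bool), (js.foldl (fun s j => s.setIfInBounds j.toNat false) sv).size = sv.size := by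
  induction js with
  | nil => intro sv; rfl
  | cons j js ih =>
    intro sv
    rw [List.foldl_cons, ih, Array.size_setIfInBounds]

theorem outer_mono (N : Int) (is : List Int) :
    ∀ (sv : Array Bool) (k : Nat),
      ((is.foldl (fun sv i =>
          if sv.getD i.toNat false = true then
            (PySem.List.pyRange (i * i) (N + 1) i).foldl
              (fun sv2 j => sv2.setIfInBounds j.toNat false) sv
          else sv) sv).getD k false = true) →
      sv.getD k false = true := by
  induction is with
  | nil => intro sv k h; exact h
  | cons i is ih =>
    intro sv k h
    rw [List.foldl_cons] at h
    have h2 := ih _ k h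
    by_cases hc : sv.getD i.toNat false = true
    · rw [if_pos hc] at h2
      exact inner_mono _ sv k h2
    · rwa [if_neg hc] at h2

theorem outer_len (N : Int) (is : List Int) :
    ∀ (sv : Array Bool),
      (is.foldl (fun sv i =>
          if sv.getD i.toNat false = true then
            (PySem.List.pyRange (i * i) (N + 1) i).foldl
              (fun sv2 j => sv2.setIfInBounds j.toNat false) sv
          else sv) sv).size = sv.size := by
  induction is with
  | nil => intro sv; rfl
  | cons i is ih =>
    intro sv
    rw [List.foldl_cons, ih]
    by_cases hc : sv.getD i.toNat false = true
    · rw [if_pos hc, inner_len]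
    · rw [if_neg hc]

theorem primes_mem (N : Int) (hN : 1 ≤ N) :
    ∀ p ∈ pvPrimes N, ∃ pp : Nat, p = (pp : Int) ∧ 2 ≤ pp ∧ pp ≤ N.toNat := by
  intro p hp
  simp only [pvPrimes] at hp
  rw [List.mem_map] at hp
  obtain ⟨q, hq, hpq⟩ := hp
  rw [List.mem_filter] at hq
  obtain ⟨hqe, hq2⟩ := hq
  rw [PySem.List.mem_enumerate_iff] at hqe
  obtain ⟨k, hk, rfl⟩ := hqe
  simp only at hpq hq2
  set s2 := ((Array.replicate (N + 1).toNat true).setIfInBounds 0 false).setIfInBounds 1 false with hs2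
  set s3 := (PySem.List.pyRange 2 (pvIsqrt N + 1) 1).foldl (fun sv i =>
      if sv.getD i.toNat false = true then
        (PySem.List.pyRange (i * i) (N + 1) i).foldl
          (fun sv2 j => sv2.setIfInBounds j.toNat false) sv
      else sv) s2 with hs3
  have hlen2 : s2.size = N.toNat + 1 := by
    rw [hs2, Array.size_setIfInBounds, Array.size_setIfInBounds, Array.size_replicate]
    omega
  have hlen3 : s3.size = N.toNat + 1 := by
    rw [hs3, outer_len, hlen2]
  have hsz3 : s3.toList.length = N.toNat + 1 := by
    rw [← Array.size_eq_length_toList, hlen3]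
  have hgd : s3.getD k false = true := by
    rw [agetD, List.getD_eq_getElem _ _ (by omega), hq2]
  have hmono := outer_mono N _ s2 k (hs3 ▸ hgd)
  have hk2 : 2 ≤ k := by
    by_contra hlt
    rw [hs2, agetD, Array.toList_setIfInBounds, Array.toList_setIfInBounds,
        Array.toList_replicate] at hmono
    interval_cases k
    · rw [getD_set _ _ _ _ _ (by simp; omega), if_neg (by omega),
          getD_set _ _ _ _ _ (by simp; omega), if_pos rfl] at hmono
      exact absurd hmono (by simp)
    · rw [getD_set _ _ _ _ _ (by simp; omega), if_pos rfl] at hmono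
      exact absurd hmono (by simp)
  refine ⟨k, by omega, hk2, by rw [← Array.size_eq_length_toList] at hk; omega⟩

theorem getD_replicate_zero (m x : Nat) : (List.replicate m (0 : Int)).getD x 0 = 0 := by
  rw [List.getD_eq_getElem?_getD, List.getElem?_replicate]
  split_ifs <;> rfl

theorem main (N : Int) (hpre : 1 ≤ N) : solve N = solve_alt N := by
  obtain ⟨n, hn, rfl⟩ : ∃ n : Nat, 1 ≤ n ∧ N = (n : Int) := ⟨N.toNat, by omega, by omega⟩
  simp only [solve, solve_alt]
  have hMpos : (0 : Int) < pvMOD := by norm_num [pvMOD]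
  have hprim : ∀ p ∈ pvPrimes (n : Int), ∃ pp : Nat, p = (pp : Int) ∧ 2 ≤ pp ∧ pp ≤ n := by
    intro p hp
    obtain ⟨pp, h1, h2, h3⟩ := primes_mem (n : Int) (by omega) p hp
    exact ⟨pp, h1, h2, by omega⟩
  -- A side initial table
  have hlen0 : ((Array.replicate ((n : Int) + 1).toNat (0 : Int)).setIfInBounds 0 1).size = n + 1 := by
    rw [Array.size_setIfInBounds, Array.size_replicate]; omega
  have hdp0 : ∀ x : Nat, x ≤ n →
      ((Array.replicate ((n : Int) + 1).toNat (0 : Int)).setIfInBounds 0 1).getD x 0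
        = ((cA [] x : Int)) % pvMOD := by
    intro x hx
    rw [agetD_set _ _ _ _ _ (by rw [Array.size_replicate]; omega)]
    by_cases h0 : 0 = x
    · rw [if_pos h0, cA, if_pos h0.symm]
      norm_num [pvMOD]
    · rw [if_neg h0, agetD, Array.toList_replicate, getD_replicate_zero, cA, if_neg (by omega)]
      norm_num
  have hA := A_outer n (pvPrimes (n : Int)) [] hprim _ hlen0 hdp0
  -- B side initial table
  have hw0 : ∀ x : Nat, x ≤ n →
      (((1 : Int) :: List.replicate n 0).toArray).getD x 0 = ((cA [] x : Int)) % pvMOD := by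
    intro x hx
    rw [agetD, List.toList_toArray]
    cases x with
    | zero => rw [List.getD_cons_zero, cA, if_pos rfl]; norm_num [pvMOD]
    | succ y =>
      rw [List.getD_cons_succ, getD_replicate_zero, cA, if_neg (by omega)]
      norm_num
  have hB := B_outer n (pvPrimes (n : Int)).reverse []
    (fun p hp => by
      obtain ⟨pp, h1, h2, _⟩ := hprim p (List.mem_reverse.mp hp)
      exact ⟨pp, h1, h2⟩) _ hw0 n le_rfl
  rw [Int.toNat_natCast, hA.2 n le_rfl, hB]
  have hperm : ((pvPrimes (n : Int)).reverse ++ []).Perm ((pvPrimes (n : Int)).reverse.reverse ++ []) := by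
    simp [List.reverse_perm]
  rw [cA_perm _ _ hperm n]

-- ===== VERDICT (by name: the statement is the Claim_ definition above) =====
theorem solve_spec : Claim_equal_solve := by
  intro N _ hpre
  unfold Spec_solve
  exact main N hpre
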